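-- pv_equiv track=rewrite | github.com/abourramouss/Optimization | TS/main.py | isTabu
-- ===== SOURCE A (Python) =====
-- def isTabu(aPermutation, tabuList):
--     size = len(aPermutation)
--     for index, node in enumerate(aPermutation):
--         if index == size - 1:
--             nextNode = aPermutation[0]
--         else:
--             nextNode = aPermutation[index + 1]
--         edge = [node, nextNode]
--         if edge in tabuList:
--             return True
--     return False
-- ===== SOURCE B (Python) =====
-- def isTabu(aPermutation, tabuList):
--     cycleEdges = [[a, b] for a, b in
--                   zip(aPermutation, aPermutation[1:] + aPermutation[:1])]
--     for tabuEdge in tabuList: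
--         if tabuEdge in cycleEdges:
--             return True
--     return False
-- ===== Notes on version B (the rewrite author's own statement) =====
-- stated objective: alternative
-- what changed: B precomputes the list of cycle edges once by zipping the tour with its rotation, then scans the tabu list for membership in that edge list, instead of A's inline edge construction with index arithmetic and a membership test of each edge in tabuList.
import Mathlib
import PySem

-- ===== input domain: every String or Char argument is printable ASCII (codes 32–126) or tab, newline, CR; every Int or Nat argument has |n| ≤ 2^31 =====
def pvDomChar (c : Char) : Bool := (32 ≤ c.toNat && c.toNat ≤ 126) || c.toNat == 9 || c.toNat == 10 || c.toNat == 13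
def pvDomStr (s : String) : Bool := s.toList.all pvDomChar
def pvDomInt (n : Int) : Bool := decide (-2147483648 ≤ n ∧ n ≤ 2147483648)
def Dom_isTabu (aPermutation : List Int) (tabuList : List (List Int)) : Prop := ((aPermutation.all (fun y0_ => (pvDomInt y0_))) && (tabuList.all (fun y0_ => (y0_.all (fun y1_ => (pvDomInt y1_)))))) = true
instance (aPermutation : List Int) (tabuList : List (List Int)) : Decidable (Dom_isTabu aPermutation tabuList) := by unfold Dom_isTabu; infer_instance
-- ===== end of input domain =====

-- B builds the cycle-edge list once by zipping the tour with its rotation and scans the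
-- tabu list against it (alternative decomposition; same results as A everywhere).


-- ===== PORT A =====
-- the 'for index, node in enumerate(aPermutation)' loop with its early 'return True';
-- aPermutation[0] / aPermutation[index+1] are always in range, so pyGetD's default is never used
def isTabuGo (size : Int) (aPermutation : List Int) (tabuList : List (List Int)) :
    List (Int × Int) → Bool
  | [] => false
  | (index, node) :: rest =>
    let nextNode := if index == size - 1 then PySem.List.pyGetD aPermutation 0 0
                    else PySem.List.pyGetD aPermutation (index + 1) 0
    let edge := [node, nextNode]
    if tabuList.contains edge then true
    else isTabuGo size aPermutation tabuList rest

def isTabu (aPermutation : List Int) (tabuList : List (List Int)) : Bool :=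
  let size : Int := aPermutation.length
  isTabuGo size aPermutation tabuList (PySem.List.enumerate aPermutation 0)

-- ===== PORT B =====
-- cycleEdges = [[a,b] for a,b in zip(aPermutation, aPermutation[1:] + aPermutation[:1])],
-- then scan tabuList for a member of cycleEdges
def isTabu_alt (aPermutation : List Int) (tabuList : List (List Int)) : Bool :=
  let cycleEdges :=
    List.zipWith (fun a b => [a, b]) aPermutation
      (aPermutation.drop 1 ++ aPermutation.take 1)
  tabuList.any (fun tabuEdge => cycleEdges.contains tabuEdge)

-- ===== PRECONDITION & SPEC =====
def Spec_isTabu (aPermutation : List Int) (tabuList : List (List Int)) (out : Bool) : Prop := out = isTabu_alt aPermutation tabuList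
instance (aPermutation : List Int) (tabuList : List (List Int)) (out : Bool) : Decidable (Spec_isTabu aPermutation tabuList out) := by unfold Spec_isTabu; infer_instance

-- ===== CLAIM (what is proved, stated in full; the proofs are below) =====
def Claim_equal_isTabu : Prop := ∀ (aPermutation : List Int) (tabuList : List (List Int)), Dom_isTabu aPermutation tabuList → Spec_isTabu aPermutation tabuList (isTabu aPermutation tabuList)

-- ===== LEMMAS AND PROOFS =====

-- the edge list B builds; its k-th entry is exactly the edge A's loop builds at index k
def pvEdges (P : List Int) : List (List Int) :=
  List.zipWith (fun a b => [a, b]) P (P.drop 1 ++ P.take 1)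

theorem pvEdges_length (P : List Int) : (pvEdges P).length = P.length := by
  cases P with
  | nil => rfl
  | cons x xs => simp [pvEdges]

theorem pvEdges_getElem (P : List Int) (k : Nat) (hk : k < P.length) :
    (pvEdges P)[k]'(by rw [pvEdges_length]; exact hk) =
      [P[k], if (k : Int) == (P.length : Int) - 1 then PySem.List.pyGetD P 0 0
             else PySem.List.pyGetD P ((k : Int) + 1) 0] := by
  unfold pvEdges
  rw [List.getElem_zipWith]
  congr 1
  by_cases h : k = P.length - 1
  · rw [if_pos (by simp; omega)]
    have h1 : (P.drop 1).length ≤ k := by simp; omega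
    rw [List.getElem_append_right h1, PySem.List.pyGetD_zero,
        List.getD_eq_getElem P 0 (by omega)]
    simp only [List.length_drop] at h1 ⊢
    simp only [List.getElem_take]
    have h2 : k - (P.length - 1) = 0 := by omega
    simp [h2]
  · rw [if_neg (by simp; omega)]
    have h1 : k < (P.drop 1).length := by simp; omega
    rw [List.getElem_append_left h1, List.getElem_drop,
        show ((k : Int) + 1 = ((k + 1 : Nat) : Int)) from by push_cast; ring,
        PySem.List.pyGetD_natCast, List.getD_eq_getElem P 0 (by omega)]
    simp [Nat.add_comm]


-- A's loop on the enumerate-suffix starting at index k computes B's edge-suffix scan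
theorem pvGo_eq (P : List Int) (T : List (List Int)) :
    ∀ (n k : Nat), P.length - k = n →
      isTabuGo (P.length : Int) P T (PySem.List.enumerate (P.drop k) (k : Int)) =
        ((pvEdges P).drop k).any (fun e => T.contains e) := by
  intro n
  induction n with
  | zero =>
    intro k hk
    rw [List.drop_eq_nil_of_le (by omega),
        List.drop_eq_nil_of_le (by rw [pvEdges_length]; omega)]
    simp [PySem.List.enumerate, isTabuGo]
  | succ n ih =>
    intro k hk
    have hklt : k < P.length := by omega
    have hd : P.drop k = P[k] :: P.drop (k + 1) := List.drop_eq_getElem_cons hklt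
    have hde : (pvEdges P).drop k =
        (pvEdges P)[k]'(by rw [pvEdges_length]; exact hklt) :: (pvEdges P).drop (k + 1) :=
      List.drop_eq_getElem_cons (by rw [pvEdges_length]; exact hklt)
    rw [hd, PySem.List.enumerate_cons, hde, pvEdges_getElem P k hklt]
    have ihk := ih (k + 1) (by omega)
    rw [show (((k + 1 : Nat) : Int)) = (k : Int) + 1 from by push_cast; ring] at ihk
    simp only [isTabuGo, List.any_cons]
    simp [ihk]

-- scanning tabuList against the edges equals scanning the edges against tabuList
theorem pvAny_comm (E T : List (List Int)) :
    T.any (fun t => E.contains t) = E.any (fun e => T.contains e) := by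
  rw [Bool.eq_iff_iff]
  simp only [List.any_eq_true, List.contains_eq_mem, decide_eq_true_eq]
  constructor <;> rintro ⟨x, h1, h2⟩ <;> exact ⟨x, h2, h1⟩

-- ===== VERDICT (by name: the statement is the Claim_ definition above) =====
theorem isTabu_spec : Claim_equal_isTabu := by
  intro P T _
  unfold Spec_isTabu isTabu isTabu_alt
  have h := pvGo_eq P T P.length 0 (by omega)
  simp only [List.drop_zero, Nat.cast_zero] at h
  rw [h, pvAny_comm]
  rfl
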